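-- pv_equiv track=rewrite | github.com/XuhaoZhao/Sequoia | financial_framework/unified_financial_system.py | fractal_highs_lows
-- ===== SOURCE A (Python) =====
-- def fractal_highs_lows(high, low, period=2):
--     """
--     分形算法识别局部高低点
--
--     Args:
--         high, low: 价格数组
--         period: 分形周期（默认2，即前后2个点）
--
--     Returns:
--         dict: {'highs': [(index, price)], 'lows': [(index, price)]}
--     """
--     fractal_highs = []
--     fractal_lows = []
--
--     for i in range(period, len(high) - period):
--         is_high = True
--         is_low = True
--
--         for j in range(i - period, i + period + 1):
--             if j == i:
--                 continue
--             if high[j] >= high[i]: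
--                 is_high = False
--             if low[j] <= low[i]:
--                 is_low = False
--
--         if is_high:
--             fractal_highs.append((i, high[i]))
--         if is_low:
--             fractal_lows.append((i, low[i]))
--
--     return {'highs': fractal_highs, 'lows': fractal_lows}
-- ===== SOURCE B (Python) =====
-- def fractal_highs_lows(high, low, period=2):
--     """Fractal detection without the inner window scan: an index is a strict
--     local high iff its nearest >=-neighbour on each side (found with a
--     monotonic stack) is farther than `period`; lows are the same computation
--     on the negated low series."""
--     n = len(high)
--
--     def prev_ge(vals):
--         # res[i] = nearest j < i with vals[j] >= vals[i], else None
--         res = []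
--         stack = []
--         for i in range(len(vals)):
--             while stack and vals[stack[-1]] < vals[i]:
--                 stack.pop()
--             res.append(stack[-1] if stack else None)
--             stack.append(i)
--         return res
--
--     def strict_peaks(vals, p, stop):
--         left = prev_ge(vals)
--         right_rev = prev_ge(list(reversed(vals)))
--         m = len(vals)
--         out = []
--         for i in range(p, stop):
--             l = left[i]
--             r = right_rev[m - 1 - i]
--             if (l is None or i - l > p) and (r is None or (m - 1 - r) - i > p):
--                 out.append((i, vals[i]))
--         return out
--
--     highs = strict_peaks(high, period, n - period)
--     lows = [(i, low[i]) for (i, _) in strict_peaks([-x for x in low], period, n - period)]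
--     return {'highs': highs, 'lows': lows}
-- ===== Notes on version B (the rewrite author's own statement) =====
-- stated objective: alternative
-- what changed: A rescans the whole 2*period+1 window for every index; B instead runs two monotonic-stack nearest-greater-or-equal-neighbour passes (lows via the negated series) and tests each index by the distance to those neighbours, removing the inner window scan (intended as asymptotically better in period; a timing run read 181x at the largest size but was not consistent across inputs, so no speed claim is made).
import Mathlib
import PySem

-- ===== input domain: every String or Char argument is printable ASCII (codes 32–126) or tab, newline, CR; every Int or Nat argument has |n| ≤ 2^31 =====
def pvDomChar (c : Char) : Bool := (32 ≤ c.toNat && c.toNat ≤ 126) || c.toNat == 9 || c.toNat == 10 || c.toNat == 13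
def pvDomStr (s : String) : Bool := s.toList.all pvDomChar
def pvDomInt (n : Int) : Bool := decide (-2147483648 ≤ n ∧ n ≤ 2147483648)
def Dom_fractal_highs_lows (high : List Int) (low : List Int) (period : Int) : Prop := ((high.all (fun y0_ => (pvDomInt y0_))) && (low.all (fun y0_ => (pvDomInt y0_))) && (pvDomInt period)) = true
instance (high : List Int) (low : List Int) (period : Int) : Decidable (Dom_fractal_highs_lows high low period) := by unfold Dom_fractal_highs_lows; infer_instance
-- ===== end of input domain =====

-- B replaces A's per-index window rescan by two monotonic-stack
-- nearest-≥-neighbour passes; return values are proved identical on Pre_.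

-- ===== PORT A =====
def fractal_highs_lows (high : List Int) (low : List Int) (period : Int) : List (String × List (Int × Int)) :=
  let res := (PySem.List.pyRange period ((high.length : Int) - period) 1).foldl
    (fun (st : List (Int × Int) × List (Int × Int)) i =>
      let flags := (PySem.List.pyRange (i - period) (i + period + 1) 1).foldl
        (fun (b : Bool × Bool) j =>
          if j = i then b
          else
            ((if PySem.List.pyGetD high i 0 ≤ PySem.List.pyGetD high j 0 then false else b.1),
             (if PySem.List.pyGetD low j 0 ≤ PySem.List.pyGetD low i 0 then false else b.2)))
        (true, true)
      ((if flags.1 then st.1 ++ [(i, PySem.List.pyGetD high i 0)] else st.1),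
       (if flags.2 then st.2 ++ [(i, PySem.List.pyGetD low i 0)] else st.2)))
    ([], [])
  [("highs", res.1), ("lows", res.2)]

-- ===== PORT B =====
-- prev_ge: res[i] = nearest j < i with vals[j] >= vals[i] (monotonic stack, top = list head)
def pvPrevGe (vals : List Int) : List (Option Int) :=
  ((PySem.List.pyRange 0 (vals.length : Int) 1).foldl
    (fun (st : List (Option Int) × List Int) i =>
      let stack := st.2.dropWhile (fun j => decide (PySem.List.pyGetD vals j 0 < PySem.List.pyGetD vals i 0))
      (st.1 ++ [stack.head?], i :: stack))
    ([], [])).1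

def pvStrictPeaks (vals : List Int) (p stop : Int) : List (Int × Int) :=
  let left := pvPrevGe vals
  let rightRev := pvPrevGe vals.reverse
  let m : Int := (vals.length : Int)
  (PySem.List.pyRange p stop 1).foldl
    (fun (out : List (Int × Int)) i =>
      if ((match PySem.List.pyGetD left i none with
            | none => true
            | some j => decide (p < i - j)) &&
          (match PySem.List.pyGetD rightRev (m - 1 - i) none with
            | none => true
            | some j => decide (p < (m - 1 - j) - i)))
      then out ++ [(i, PySem.List.pyGetD vals i 0)] else out)
    []

def fractal_highs_lows_alt (high : List Int) (low : List Int) (period : Int) : List (String × List (Int × Int)) :=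
  let n : Int := (high.length : Int)
  let highs := pvStrictPeaks high period (n - period)
  let lows := (pvStrictPeaks (low.map (fun x => -x)) period (n - period)).map
    (fun pr => (pr.1, PySem.List.pyGetD low pr.1 0))
  [("highs", highs), ("lows", lows)]

-- ===== PRECONDITION & SPEC =====
-- Pre_ excludes exactly the inputs where A raises IndexError: a negative period
-- (the loop then reads past the end), or a low shorter than high while the loop runs.
def Pre_fractal_highs_lows (high : List Int) (low : List Int) (period : Int) : Prop :=
  0 ≤ period ∧ ((high.length : Int) ≤ 2 * period ∨ high.length ≤ low.length)
instance (high : List Int) (low : List Int) (period : Int) : Decidable (Pre_fractal_highs_lows high low period) := by unfold Pre_fractal_highs_lows; infer_instance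

def pvWitness_fractal_highs_lows : List Int × List Int × Int := ([5, 1, 4, 1, 3], [4, 0, 3, 0, 2], 1)

def Spec_fractal_highs_lows (high : List Int) (low : List Int) (period : Int) (out : List (String × List (Int × Int))) : Prop := out = fractal_highs_lows_alt high low period
instance (high : List Int) (low : List Int) (period : Int) (out : List (String × List (Int × Int))) : Decidable (Spec_fractal_highs_lows high low period out) := by unfold Spec_fractal_highs_lows; infer_instance

-- ===== CLAIM (what is proved, stated in full; the proofs are below) =====
def Claim_equal_fractal_highs_lows : Prop := ∀ (high : List Int) (low : List Int) (period : Int), Dom_fractal_highs_lows high low period → Pre_fractal_highs_lows high low period → Spec_fractal_highs_lows high low period (fractal_highs_lows high low period)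

-- ===== LEMMAS AND PROOFS =====

-- value at a (Nat) index, default 0 — the quantity both programs compare
def pvD (vals : List Int) (j : Nat) : Int := vals.getD j 0

-- "j survives in the stack after the first i elements": everything after j (and before i) is ≤ vals[j]
def pvP (vals : List Int) (i j : Nat) : Bool := decide (∀ k, k < i → j < k → pvD vals k ≤ pvD vals j)

-- the stack contents after processing indices 0..i-1 (top of stack = head)
def pvNS (vals : List Int) (i : Nat) : List Nat := ((List.range i).filter (pvP vals i)).reverse

-- the value res[i] receives
def pvEntry (vals : List Int) (i : Nat) : Option Int :=
  (((pvNS vals i).filter (fun j => !decide (pvD vals j < pvD vals i))).head?).map Int.ofNat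

lemma pv_dropWhile_eq_filter {α : Type} (p : α → Bool) (l : List α)
    (h : l.Pairwise (fun a b => p b = true → p a = true)) :
    l.dropWhile p = l.filter (fun x => !p x) := by
  induction l with
  | nil => rfl
  | cons a t ih =>
    rcases List.pairwise_cons.mp h with ⟨ha, ht⟩
    by_cases hp : p a = true
    · simp [hp, ih ht]
    · simp only [List.dropWhile_cons, List.filter_cons, hp]
      simp only [Bool.not_eq_true] at hp
      simp only [Bool.not_false, if_pos]
      have : t.filter (fun x => !p x) = t := by
        refine List.filter_eq_self.mpr (fun x hx => ?_)
        simp only [Bool.not_eq_true']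
        by_contra hc
        simp only [Bool.not_eq_false] at hc
        have := ha x hx hc
        simp [hp] at this
      simp [this]

lemma pvNS_mem (vals : List Int) (i : Nat) (j : Nat) :
    j ∈ pvNS vals i ↔ j < i ∧ ∀ k, k < i → j < k → pvD vals k ≤ pvD vals j := by
  simp [pvNS, pvP, List.mem_filter]

lemma pvNS_pairwise_gt (vals : List Int) (i : Nat) :
    (pvNS vals i).Pairwise (fun a b => b < a) := by
  unfold pvNS
  rw [List.pairwise_reverse]
  exact (List.pairwise_lt_range).filter _

lemma pvNS_pairwise_imp (vals : List Int) (i : Nat) :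
    (pvNS vals i).Pairwise (fun a b =>
      decide (pvD vals b < pvD vals i) = true → decide (pvD vals a < pvD vals i) = true) := by
  unfold pvNS
  rw [List.pairwise_reverse]
  have base : List.Pairwise (· < ·) ((List.range i).filter (pvP vals i)) :=
    (List.pairwise_lt_range).filter _
  refine base.imp_of_mem ?_
  intro a b hma hmb hab
  rcases List.mem_filter.mp hma with ⟨hra, hpa⟩
  have hba : pvD vals b ≤ pvD vals a :=
    (decide_eq_true_iff.mp hpa) b (List.mem_range.mp (List.mem_filter.mp hmb).1) hab
  simp only [decide_eq_true_iff]
  intro hlt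
  omega

lemma pvNS_succ (vals : List Int) (k : Nat) :
    pvNS vals (k + 1) = k :: (pvNS vals k).filter (fun j => !decide (pvD vals j < pvD vals k)) := by
  have hk : pvP vals (k + 1) k = true := by
    simp only [pvP, decide_eq_true_iff]
    intro c hc hkc; omega
  have hcong : (List.range k).filter (pvP vals (k + 1)) =
      (List.range k).filter (fun j => !decide (pvD vals j < pvD vals k) && pvP vals k j) := by
    refine List.filter_congr fun j hj => ?_
    have hjk := List.mem_range.mp hj
    have hnot : (!decide (pvD vals j < pvD vals k)) = decide (pvD vals k ≤ pvD vals j) := by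
      rw [← decide_not, decide_eq_decide]
      exact not_lt
    rw [hnot]
    simp only [pvP, ← Bool.decide_and, decide_eq_decide]
    constructor
    · intro h
      exact ⟨h k (by omega) hjk, fun c hc hjc => h c (by omega) hjc⟩
    · rintro ⟨h2, h1⟩ c hc hjc
      rcases Nat.lt_succ_iff_lt_or_eq.mp hc with hc' | rfl
      · exact h1 c hc' hjc
      · exact h2
  unfold pvNS
  rw [List.range_succ, List.filter_append, hcong, ← List.filter_filter]
  simp [hk, List.reverse_append, List.filter_reverse]

lemma pv_fold_inv (vals : List Int) (k : Nat) :
    ((PySem.List.pyRange 0 (k : Int) 1).foldl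
      (fun (st : List (Option Int) × List Int) i =>
        let stack := st.2.dropWhile (fun j => decide (PySem.List.pyGetD vals j 0 < PySem.List.pyGetD vals i 0))
        (st.1 ++ [stack.head?], i :: stack))
      ([], [])) = ((List.range k).map (pvEntry vals), (pvNS vals k).map Int.ofNat) := by
  induction k with
  | zero => simp [pvNS]
  | succ k ih =>
    have hcast : ((k + 1 : Nat) : Int) = (k : Int) + 1 := by push_cast; ring
    rw [hcast, PySem.List.pyRange_one_succ_right (by positivity), List.foldl_append, ih]
    simp only [List.foldl_cons, List.foldl_nil]
    have hdw : ((pvNS vals k).map Int.ofNat).dropWhile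
        (fun j => decide (PySem.List.pyGetD vals j 0 < PySem.List.pyGetD vals (k : Int) 0)) =
        ((pvNS vals k).filter (fun j => !decide (pvD vals j < pvD vals k))).map Int.ofNat := by
      rw [List.dropWhile_map]
      have hpred : ((fun j => decide (PySem.List.pyGetD vals j 0 < PySem.List.pyGetD vals (k : Int) 0)) ∘ Int.ofNat) =
          (fun j : Nat => decide (pvD vals j < pvD vals k)) := by
        funext j
        simp [Function.comp, PySem.List.pyGetD_natCast, pvD]
      rw [hpred, pv_dropWhile_eq_filter _ _ (pvNS_pairwise_imp vals k)]
    rw [hdw]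
    refine Prod.ext ?_ ?_
    · rw [List.range_succ, List.map_append]
      simp [pvEntry, List.head?_map]
    · rw [pvNS_succ]
      simp

lemma pvPrevGe_eq (vals : List Int) : pvPrevGe vals = (List.range vals.length).map (pvEntry vals) := by
  unfold pvPrevGe
  rw [pv_fold_inv vals vals.length]

lemma pvEntry_none_iff (vals : List Int) (i : Nat) :
    pvEntry vals i = none ↔ ∀ j, j < i → pvD vals j < pvD vals i := by
  unfold pvEntry
  rw [Option.map_eq_none_iff, List.head?_eq_none_iff]
  constructor
  · intro hnil j hj
    by_contra hge
    push_neg at hge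
    set P : Nat → Prop := fun x => x < i ∧ pvD vals i ≤ pvD vals x with hP
    have hPj : P j := ⟨hj, hge⟩
    set js := Nat.findGreatest P i with hjs
    have hPjs : P js := Nat.findGreatest_spec (le_of_lt hj) hPj
    have hmem : js ∈ (pvNS vals i).filter (fun j => !decide (pvD vals j < pvD vals i)) := by
      rw [List.mem_filter]
      refine ⟨(pvNS_mem vals i js).mpr ⟨hPjs.1, fun k hk hjsk => ?_⟩, by
        simp only [Bool.not_eq_true', decide_eq_false_iff_not, not_lt]; exact hPjs.2⟩
      have hnPk : ¬ P k := Nat.findGreatest_is_greatest hjsk (by omega)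
      have : pvD vals k < pvD vals i := by
        by_contra hc; push_neg at hc; exact hnPk ⟨hk, hc⟩
      exact le_of_lt (lt_of_lt_of_le this hPjs.2)
    rw [hnil] at hmem
    exact absurd hmem (List.not_mem_nil)
  · intro hall
    rw [List.eq_nil_iff_forall_not_mem]
    intro j hmem
    rcases List.mem_filter.mp hmem with ⟨hns, hflt⟩
    have hj := ((pvNS_mem vals i j).mp hns).1
    have := hall j hj
    simp only [Bool.not_eq_true', decide_eq_false_iff_not, not_lt] at hflt
    omega

lemma pvEntry_some_spec (vals : List Int) (i : Nat)
    (hne : ¬ ∀ j, j < i → pvD vals j < pvD vals i) :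
    ∃ js : Nat, pvEntry vals i = some (js : Int) ∧ js < i ∧ pvD vals i ≤ pvD vals js ∧
      ∀ k, js < k → k < i → pvD vals k < pvD vals i := by
  push_neg at hne
  obtain ⟨j, hj, hge⟩ := hne
  set P : Nat → Prop := fun x => x < i ∧ pvD vals i ≤ pvD vals x with hP
  set js := Nat.findGreatest P i with hjs
  have hPjs : P js := Nat.findGreatest_spec (le_of_lt hj) ⟨hj, hge⟩
  have hnPk : ∀ k, js < k → k < i → pvD vals k < pvD vals i := by
    intro k hk1 hk2
    have : ¬ P k := Nat.findGreatest_is_greatest hk1 (by omega)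
    by_contra hc; push_neg at hc; exact this ⟨hk2, hc⟩
  refine ⟨js, ?_, hPjs.1, hPjs.2, hnPk⟩
  set F := (pvNS vals i).filter (fun j => !decide (pvD vals j < pvD vals i)) with hF
  have hmem : js ∈ F := by
    rw [hF, List.mem_filter]
    refine ⟨(pvNS_mem vals i js).mpr ⟨hPjs.1, fun k hk hjsk => ?_⟩, by
      simp only [Bool.not_eq_true', decide_eq_false_iff_not, not_lt]; exact hPjs.2⟩
    exact le_of_lt (lt_of_lt_of_le (hnPk k hjsk hk) hPjs.2)
  have hpw : F.Pairwise (fun a b => b < a) := (pvNS_pairwise_gt vals i).filter _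
  unfold pvEntry
  rw [← hF]
  obtain ⟨h, t, hht⟩ : ∃ h t, F = h :: t := by
    cases hFc : F with
    | nil => rw [hFc] at hmem; exact absurd hmem (List.not_mem_nil)
    | cons h t => exact ⟨h, t, rfl⟩
  have hhmem : h ∈ F := by rw [hht]; exact List.mem_cons_self
  have hhle : h ≤ js := by
    rcases List.mem_filter.mp hhmem with ⟨hns, hflt⟩
    have hhi := ((pvNS_mem vals i h).mp hns).1
    simp only [Bool.not_eq_true', decide_eq_false_iff_not, not_lt] at hflt
    exact Nat.le_findGreatest (by omega) ⟨hhi, hflt⟩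
  have hjsle : js ≤ h := by
    rw [hht] at hmem hpw
    rcases List.mem_cons.mp hmem with rfl | hmt
    · exact le_refl _
    · have := (List.pairwise_cons.mp hpw).1 js hmt
      omega
  have : h = js := le_antisymm hhle hjsle
  rw [hht, List.head?_cons, this]
  rfl

lemma pv_revD (vals : List Int) (j : Nat) (hj : j < vals.length) :
    pvD vals.reverse j = pvD vals (vals.length - 1 - j) := by
  unfold pvD
  rw [List.getD_eq_getElem?_getD, List.getD_eq_getElem?_getD, List.getElem?_reverse hj]

lemma pv_peak_iff (vals : List Int) (p i : Nat) (hp : p ≤ i) (hb : i + p < vals.length) :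
    (((match pvEntry vals i with
        | none => true
        | some j => decide ((p : Int) < (i : Int) - j)) &&
      (match pvEntry vals.reverse (vals.length - 1 - i) with
        | none => true
        | some j => decide ((p : Int) < ((vals.length : Int) - 1 - j) - (i : Int)))) = true)
    ↔ ∀ k : Nat, i - p ≤ k → k ≤ i + p → k ≠ i → pvD vals k < pvD vals i := by
  set L := vals.length with hLdef
  have hi : i < L := by omega
  have hleft : ((match pvEntry vals i with
      | none => true
      | some j => decide ((p : Int) < (i : Int) - j)) = true)
      ↔ ∀ k : Nat, i - p ≤ k → k < i → pvD vals k < pvD vals i := by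
    by_cases hall : ∀ j, j < i → pvD vals j < pvD vals i
    · rw [(pvEntry_none_iff vals i).mpr hall]
      exact ⟨fun _ k _ hk => hall k hk, fun _ => rfl⟩
    · obtain ⟨js, hEq, hjsi, hgejs, hbetween⟩ := pvEntry_some_spec vals i hall
      rw [hEq]
      simp only [decide_eq_true_iff]
      constructor
      · intro hlt k hk1 hk2
        exact hbetween k (by omega) hk2
      · intro hwin
        by_contra hle
        push_neg at hle
        have := hwin js (by omega) hjsi
        omega
  have hrev : ∀ k : Nat, k < L → pvD vals.reverse k = pvD vals (L - 1 - k) := by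
    intro k hk
    have := pv_revD vals k (by omega)
    rwa [← hLdef] at this
  have hrlen : vals.reverse.length = L := by simp [hLdef]
  have hright : ((match pvEntry vals.reverse (L - 1 - i) with
      | none => true
      | some j => decide ((p : Int) < ((L : Int) - 1 - j) - (i : Int))) = true)
      ↔ ∀ k : Nat, i < k → k ≤ i + p → pvD vals k < pvD vals i := by
    by_cases hall : ∀ j, j < L - 1 - i → pvD vals.reverse j < pvD vals.reverse (L - 1 - i)
    · rw [(pvEntry_none_iff vals.reverse (L - 1 - i)).mpr hall]
      refine ⟨fun _ k hk1 hk2 => ?_, fun _ => rfl⟩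
      have hkL : k < L := by omega
      have := hall (L - 1 - k) (by omega)
      rw [hrev (L - 1 - k) (by omega), hrev (L - 1 - i) (by omega)] at this
      have e1 : L - 1 - (L - 1 - k) = k := by omega
      have e2 : L - 1 - (L - 1 - i) = i := by omega
      rw [e1, e2] at this
      exact this
    · obtain ⟨js, hEq, hjsr, hgejs, hbetween⟩ := pvEntry_some_spec vals.reverse (L - 1 - i) hall
      rw [hEq]
      simp only [decide_eq_true_iff]
      have hjsL : js < L := by omega
      set kp := L - 1 - js with hkp
      have hik : i < kp := by omega
      have hkpL : kp < L := by omega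
      have e2 : L - 1 - (L - 1 - i) = i := by omega
      have hvkp : pvD vals i ≤ pvD vals kp := by
        have := hgejs
        rw [hrev js hjsL, hrev (L - 1 - i) (by omega), e2] at this
        exact this
      have hbet' : ∀ k, i < k → k < kp → pvD vals k < pvD vals i := by
        intro k hk1 hk2
        have := hbetween (L - 1 - k) (by omega) (by omega)
        rw [hrev (L - 1 - k) (by omega), hrev (L - 1 - i) (by omega), e2] at this
        have e1 : L - 1 - (L - 1 - k) = k := by omega
        rw [e1] at this
        exact this
      constructor
      · intro hlt k hk1 hk2
        exact hbet' k hk1 (by omega)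
      · intro hwin
        by_contra hle
        push_neg at hle
        have := hwin kp hik (by omega)
        omega
  rw [Bool.and_eq_true, hleft, hright]
  constructor
  · rintro ⟨hL', hR'⟩ k hk1 hk2 hk3
    rcases Nat.lt_or_ge k i with h | h
    · exact hL' k hk1 h
    · exact hR' k (by omega) hk2
  · intro hwin
    exact ⟨fun k hk1 hk2 => hwin k hk1 (by omega) (by omega),
           fun k hk1 hk2 => hwin k (by omega) hk2 (by omega)⟩

lemma pv_inner_fold (high low : List Int) (i : Int) (L : List Int) (b1 b2 : Bool) :
    L.foldl
      (fun (b : Bool × Bool) j =>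
        if j = i then b
        else
          ((if PySem.List.pyGetD high i 0 ≤ PySem.List.pyGetD high j 0 then false else b.1),
           (if PySem.List.pyGetD low j 0 ≤ PySem.List.pyGetD low i 0 then false else b.2)))
      (b1, b2) =
    (b1 && L.all (fun j => j == i || !decide (PySem.List.pyGetD high i 0 ≤ PySem.List.pyGetD high j 0)),
     b2 && L.all (fun j => j == i || !decide (PySem.List.pyGetD low j 0 ≤ PySem.List.pyGetD low i 0))) := by
  induction L generalizing b1 b2 with
  | nil => simp
  | cons j t ih =>
    simp only [List.foldl_cons, List.all_cons]
    by_cases hj : j = i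
    · subst hj
      rw [if_pos rfl, ih]
      simp
    · rw [if_neg hj, ih]
      have hbeq : (j == i) = false := by simp [hj]
      by_cases h1 : PySem.List.pyGetD high i 0 ≤ PySem.List.pyGetD high j 0 <;>
        by_cases h2 : PySem.List.pyGetD low j 0 ≤ PySem.List.pyGetD low i 0
      all_goals simp [h1, h2, hbeq, Bool.and_assoc]

lemma pv_getD_map_neg (low : List Int) (j : Nat) :
    pvD (low.map (fun x => -x)) j = -(pvD low j) := by
  unfold pvD
  rw [List.getD_eq_getElem?_getD, List.getD_eq_getElem?_getD, List.getElem?_map]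
  cases low[j]? <;> simp

-- the specific two-accumulator append-if loop shape of A's outer loop
lemma pv_pair_fold (R : List Int) (ph pl : Int → Bool) (fh fl : Int → Int × Int)
    (a b : List (Int × Int)) :
    R.foldl (fun (st : List (Int × Int) × List (Int × Int)) i =>
        ((if ph i then st.1 ++ [fh i] else st.1), (if pl i then st.2 ++ [fl i] else st.2))) (a, b)
      = (a ++ (R.filter ph).map fh, b ++ (R.filter pl).map fl) := by
  induction R generalizing a b with
  | nil => simp
  | cons i t ih =>
    simp only [List.foldl_cons, List.filter_cons]
    by_cases h1 : ph i <;> by_cases h2 : pl i <;>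
      simp [h1, h2, ih, List.append_assoc]

lemma pv_A_eq (high low : List Int) (period : Int) :
    fractal_highs_lows high low period =
      [("highs", ((PySem.List.pyRange period ((high.length : Int) - period) 1).filter (fun i =>
          (PySem.List.pyRange (i - period) (i + period + 1) 1).all
            (fun j => j == i || !decide (PySem.List.pyGetD high i 0 ≤ PySem.List.pyGetD high j 0)))).map
          (fun i => (i, PySem.List.pyGetD high i 0))),
       ("lows", ((PySem.List.pyRange period ((high.length : Int) - period) 1).filter (fun i =>
          (PySem.List.pyRange (i - period) (i + period + 1) 1).all
            (fun j => j == i || !decide (PySem.List.pyGetD low j 0 ≤ PySem.List.pyGetD low i 0)))).map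
          (fun i => (i, PySem.List.pyGetD low i 0)))] := by
  unfold fractal_highs_lows
  simp only [pv_inner_fold, Bool.true_and, pv_pair_fold, List.nil_append]

lemma pv_B_peaks (vals : List Int) (p stop : Int) :
    pvStrictPeaks vals p stop =
      ((PySem.List.pyRange p stop 1).filter (fun i =>
        ((match PySem.List.pyGetD (pvPrevGe vals) i none with
           | none => true
           | some j => decide (p < i - j)) &&
         (match PySem.List.pyGetD (pvPrevGe vals.reverse) ((vals.length : Int) - 1 - i) none with
           | none => true
           | some j => decide (p < ((vals.length : Int) - 1 - j) - i))))).map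
        (fun i => (i, PySem.List.pyGetD vals i 0)) := by
  unfold pvStrictPeaks
  simp only []
  rw [PySem.List.foldl_append_if]
  simp

lemma pv_lookup (f : Nat → Option Int) (n k : Nat) (hk : k < n) :
    PySem.List.pyGetD ((List.range n).map f) (k : Int) none = f k := by
  rw [PySem.List.pyGetD_natCast, List.getD_eq_getElem?_getD, List.getElem?_map,
    List.getElem?_range hk]
  rfl

lemma pv_bool_ext {a b : Bool} (h : a = true ↔ b = true) : a = b := by
  cases a <;> cases b <;> simp_all

-- B's per-index test, reduced to the strict-window property
lemma pv_Q_iff (vals : List Int) (pn iN : Nat) (hp : pn ≤ iN) (hb : iN + pn < vals.length) :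
    (((match PySem.List.pyGetD (pvPrevGe vals) ((iN : Int)) none with
        | none => true
        | some j => decide ((pn : Int) < (iN : Int) - j)) &&
      (match PySem.List.pyGetD (pvPrevGe vals.reverse) ((vals.length : Int) - 1 - (iN : Int)) none with
        | none => true
        | some j => decide ((pn : Int) < ((vals.length : Int) - 1 - j) - (iN : Int)))) = true)
    ↔ ∀ k : Nat, iN - pn ≤ k → k ≤ iN + pn → k ≠ iN → pvD vals k < pvD vals iN := by
  rw [pvPrevGe_eq, pvPrevGe_eq, pv_lookup _ _ _ (show iN < vals.length by omega)]
  have hrlen : vals.reverse.length = vals.length := by simp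
  have hidx : ((vals.length : Int) - 1 - (iN : Int)) = ((vals.length - 1 - iN : Nat) : Int) := by
    omega
  rw [hrlen, hidx, pv_lookup _ _ _ (show vals.length - 1 - iN < vals.length by omega)]
  exact pv_peak_iff vals pn iN hp hb

-- A's per-index high test, reduced to the same window property
lemma pv_Ahigh_iff (vals : List Int) (pn iN : Nat) (hp : pn ≤ iN) :
    ((PySem.List.pyRange ((iN : Int) - (pn : Int)) ((iN : Int) + (pn : Int) + 1) 1).all
      (fun j => j == (iN : Int) ||
        !decide (PySem.List.pyGetD vals (iN : Int) 0 ≤ PySem.List.pyGetD vals j 0)) = true)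
    ↔ ∀ k : Nat, iN - pn ≤ k → k ≤ iN + pn → k ≠ iN → pvD vals k < pvD vals iN := by
  rw [List.all_eq_true]
  constructor
  · intro h k h1 h2 h3
    have hmem : ((k : Int)) ∈ PySem.List.pyRange ((iN : Int) - (pn : Int)) ((iN : Int) + (pn : Int) + 1) 1 :=
      (PySem.List.mem_pyRange_one).mpr (by omega)
    have hthis := h _ hmem
    have hne : ((k : Int) == (iN : Int)) = false := by
      simp only [beq_eq_false_iff_ne, ne_eq, Int.natCast_inj]
      omega
    rw [hne] at hthis
    simp only [Bool.false_or, Bool.not_eq_true', decide_eq_false_iff_not, not_le,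
      PySem.List.pyGetD_natCast] at hthis
    exact hthis
  · intro h j hj
    rw [PySem.List.mem_pyRange_one] at hj
    obtain ⟨k, rfl⟩ : ∃ k : Nat, j = (k : Int) := ⟨j.toNat, by omega⟩
    by_cases hk : k = iN
    · simp [hk]
    · have hlt := h k (by omega) (by omega) hk
      simp only [PySem.List.pyGetD_natCast, Bool.or_eq_true, Bool.not_eq_true',
        decide_eq_false_iff_not, not_le]
      exact Or.inr hlt

-- A's per-index low test equals the window property of the negated lows
lemma pv_Alow_iff (low : List Int) (pn iN : Nat) (hp : pn ≤ iN) :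
    ((PySem.List.pyRange ((iN : Int) - (pn : Int)) ((iN : Int) + (pn : Int) + 1) 1).all
      (fun j => j == (iN : Int) ||
        !decide (PySem.List.pyGetD low j 0 ≤ PySem.List.pyGetD low (iN : Int) 0)) = true)
    ↔ ∀ k : Nat, iN - pn ≤ k → k ≤ iN + pn → k ≠ iN →
        pvD (low.map (fun x => -x)) k < pvD (low.map (fun x => -x)) iN := by
  rw [List.all_eq_true]
  constructor
  · intro h k h1 h2 h3
    have hmem : ((k : Int)) ∈ PySem.List.pyRange ((iN : Int) - (pn : Int)) ((iN : Int) + (pn : Int) + 1) 1 :=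
      (PySem.List.mem_pyRange_one).mpr (by omega)
    have hthis := h _ hmem
    have hne : ((k : Int) == (iN : Int)) = false := by
      simp only [beq_eq_false_iff_ne, ne_eq, Int.natCast_inj]
      omega
    rw [hne] at hthis
    simp only [Bool.false_or, Bool.not_eq_true', decide_eq_false_iff_not, not_le,
      PySem.List.pyGetD_natCast] at hthis
    rw [pv_getD_map_neg, pv_getD_map_neg]
    unfold pvD
    omega
  · intro h j hj
    rw [PySem.List.mem_pyRange_one] at hj
    obtain ⟨k, rfl⟩ : ∃ k : Nat, j = (k : Int) := ⟨j.toNat, by omega⟩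
    by_cases hk : k = iN
    · simp [hk]
    · have hlt := h k (by omega) (by omega) hk
      rw [pv_getD_map_neg, pv_getD_map_neg] at hlt
      simp only [PySem.List.pyGetD_natCast, Bool.or_eq_true, Bool.not_eq_true',
        decide_eq_false_iff_not, not_le]
      refine Or.inr ?_
      unfold pvD at hlt
      omega

-- ===== VERDICT (by name: the statement is the Claim_ definition above) =====
theorem fractal_highs_lows_spec : Claim_equal_fractal_highs_lows := by
  unfold Claim_equal_fractal_highs_lows
  intro high low period hdom hpre
  obtain ⟨hper, hlen⟩ := hpre
  unfold Spec_fractal_highs_lows fractal_highs_lows_alt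
  simp only []
  obtain ⟨pn, rfl⟩ : ∃ pn : Nat, period = (pn : Int) := ⟨period.toNat, by omega⟩
  rw [pv_A_eq, pv_B_peaks, pv_B_peaks, List.map_map]
  have hlmap : ((low.map (fun x => -x)).length : Int) = (low.length : Int) := by simp
  rw [hlmap]
  have ehigh : (PySem.List.pyRange (pn : Int) ((high.length : Int) - (pn : Int)) 1).filter
      (fun i => (PySem.List.pyRange (i - (pn : Int)) (i + (pn : Int) + 1) 1).all
        (fun j => j == i || !decide (PySem.List.pyGetD high i 0 ≤ PySem.List.pyGetD high j 0)))
      = (PySem.List.pyRange (pn : Int) ((high.length : Int) - (pn : Int)) 1).filter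
      (fun i => ((match PySem.List.pyGetD (pvPrevGe high) i none with
           | none => true
           | some j => decide ((pn : Int) < i - j)) &&
         (match PySem.List.pyGetD (pvPrevGe high.reverse) ((high.length : Int) - 1 - i) none with
           | none => true
           | some j => decide ((pn : Int) < ((high.length : Int) - 1 - j) - i)))) := by
    refine List.filter_congr fun i hi => ?_
    rw [PySem.List.mem_pyRange_one] at hi
    obtain ⟨iN, rfl⟩ : ∃ iN : Nat, i = (iN : Int) := ⟨i.toNat, by omega⟩
    refine pv_bool_ext ?_
    rw [pv_Ahigh_iff high pn iN (by omega),
      pv_Q_iff high pn iN (by omega) (by omega)]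
  have elow : (PySem.List.pyRange (pn : Int) ((high.length : Int) - (pn : Int)) 1).filter
      (fun i => (PySem.List.pyRange (i - (pn : Int)) (i + (pn : Int) + 1) 1).all
        (fun j => j == i || !decide (PySem.List.pyGetD low j 0 ≤ PySem.List.pyGetD low i 0)))
      = (PySem.List.pyRange (pn : Int) ((high.length : Int) - (pn : Int)) 1).filter
      (fun i => ((match PySem.List.pyGetD (pvPrevGe (low.map (fun x => -x))) i none with
           | none => true
           | some j => decide ((pn : Int) < i - j)) &&
         (match PySem.List.pyGetD (pvPrevGe (low.map (fun x => -x)).reverse) ((low.length : Int) - 1 - i) none with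
           | none => true
           | some j => decide ((pn : Int) < ((low.length : Int) - 1 - j) - i)))) := by
    refine List.filter_congr fun i hi => ?_
    rw [PySem.List.mem_pyRange_one] at hi
    have hlow : high.length ≤ low.length := by
      rcases hlen with h | h
      · exfalso; omega
      · exact h
    obtain ⟨iN, rfl⟩ : ∃ iN : Nat, i = (iN : Int) := ⟨i.toNat, by omega⟩
    refine pv_bool_ext ?_
    have hQ := pv_Q_iff (low.map (fun x => -x)) pn iN (by omega)
      (by rw [List.length_map]; omega)
    rw [List.length_map] at hQ
    rw [pv_Alow_iff low pn iN (by omega), hQ]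
  rw [ehigh, elow]
  simp [Function.comp]
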